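-- pv_equiv track=rewrite | github.com/braedenbrooking/cribbage-ai | util.py | find15sFourCard
-- ===== SOURCE A (Python) =====
-- def find15sFourCard(values):
--     points = 0
--     for i in range(len(values)):
--         for j in range(i + 1, len(values)):
--             for k in range(j + 1, len(values)):
--                 for l in range(k + 1, len(values)):
--                     if values[i] + values[j] + values[k] + values[l] == 15:
--                         points += 2
--     return points
-- ===== SOURCE B (Python) =====
-- def find15sFourCard(values):
--     # Include/exclude recursion: cnt(vs, k, t) = number of k-card subsets of vs summing to t.
--     def cnt(vs, k, t):
--         if k == 0:
--             return 1 if t == 0 else 0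
--         if not vs:
--             return 0
--         return cnt(vs[1:], k, t) + cnt(vs[1:], k - 1, t - vs[0])
--     return 2 * cnt(values, 4, 15)
-- ===== Notes on version B (the rewrite author's own statement) =====
-- stated objective: alternative
-- what changed: The four nested index loops are replaced by a single include/exclude recursion cnt(vs,k,t) counting k-card subsets summing to t, returning 2*cnt(values,4,15).
import Mathlib
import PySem

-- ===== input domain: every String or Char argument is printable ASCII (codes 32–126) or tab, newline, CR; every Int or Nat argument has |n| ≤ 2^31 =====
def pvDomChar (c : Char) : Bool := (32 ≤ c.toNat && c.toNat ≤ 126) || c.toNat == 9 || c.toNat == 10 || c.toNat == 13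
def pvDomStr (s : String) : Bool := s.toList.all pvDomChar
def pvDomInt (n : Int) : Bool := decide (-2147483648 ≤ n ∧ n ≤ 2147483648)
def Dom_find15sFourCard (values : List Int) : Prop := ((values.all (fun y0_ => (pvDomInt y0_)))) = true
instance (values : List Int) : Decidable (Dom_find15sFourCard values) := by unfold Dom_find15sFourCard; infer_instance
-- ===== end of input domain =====

-- B replaces the four nested index loops by an include/exclude recursion counting
-- k-card subsets summing to a target (alternative decomposition, same cost class).

-- ===== PORT A =====
def find15sFourCard (values : List Int) : Int :=
  (PySem.List.pyRange 0 values.length 1).foldl (fun points i =>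
    (PySem.List.pyRange (i + 1) values.length 1).foldl (fun points j =>
      (PySem.List.pyRange (j + 1) values.length 1).foldl (fun points k =>
        (PySem.List.pyRange (k + 1) values.length 1).foldl (fun points l =>
          if PySem.List.pyGetD values i 0 + PySem.List.pyGetD values j 0 +
             PySem.List.pyGetD values k 0 + PySem.List.pyGetD values l 0 = 15
          then points + 2 else points) points) points) points) 0

-- ===== PORT B =====
-- cnt(vs, k, t) from Source B: number of k-card subsets of vs summing to t.
def cntAlt : List Int → Nat → Int → Int
  | _, 0, t => if t = 0 then 1 else 0
  | [], _ + 1, _ => 0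
  | v :: r, k + 1, t => cntAlt r (k + 1) t + cntAlt r k (t - v)

def find15sFourCard_alt (values : List Int) : Int := 2 * cntAlt values 4 15

-- ===== PRECONDITION & SPEC =====
def Spec_find15sFourCard (values : List Int) (out : Int) : Prop := out = find15sFourCard_alt values
instance (values : List Int) (out : Int) : Decidable (Spec_find15sFourCard values out) := by unfold Spec_find15sFourCard; infer_instance

-- ===== CLAIM (what is proved, stated in full; the proofs are below) =====
def Claim_equal_find15sFourCard : Prop := ∀ (values : List Int), Dom_find15sFourCard values → Spec_find15sFourCard values (find15sFourCard values)

-- ===== LEMMAS AND PROOFS =====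

theorem lvl4 (values : List Int) : ∀ (d j : Nat) (c acc : Int), values.length - j = d →
    (PySem.List.pyRange (j : Int) values.length 1).foldl (fun points l =>
      if c + PySem.List.pyGetD values l 0 = 15 then points + 2 else points) acc
    = acc + 2 * cntAlt (values.drop j) 1 (15 - c) := by
  intro d
  induction d with
  | zero =>
    intro j c acc hd
    have hj : values.length ≤ j := by omega
    rw [PySem.List.pyRange_one_eq_nil (by exact_mod_cast hj),
        List.drop_eq_nil_of_le hj]
    simp [cntAlt]
  | succ d ih =>
    intro j c acc hd
    have hj : j < values.length := by omega
    rw [PySem.List.pyRange_one_cons (by exact_mod_cast hj)]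
    simp only [List.foldl_cons, PySem.List.pyGetD_natCast]
    have hcast : ((j : Int) + 1) = ((j + 1 : Nat) : Int) := by push_cast; ring
    rw [hcast, ih (j + 1) c _ (by omega),
        List.drop_eq_getElem_cons hj, List.getD_eq_getElem values 0 hj]
    simp only [cntAlt, Nat.zero_add]
    split_ifs <;> omega

theorem lvl3 (values : List Int) : ∀ (d j : Nat) (c acc : Int), values.length - j = d →
    (PySem.List.pyRange (j : Int) values.length 1).foldl (fun points k =>
      (PySem.List.pyRange (k + 1) values.length 1).foldl (fun points l =>
        if c + PySem.List.pyGetD values k 0 + PySem.List.pyGetD values l 0 = 15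
        then points + 2 else points) points) acc
    = acc + 2 * cntAlt (values.drop j) 2 (15 - c) := by
  intro d
  induction d with
  | zero =>
    intro j c acc hd
    have hj : values.length ≤ j := by omega
    rw [PySem.List.pyRange_one_eq_nil (by exact_mod_cast hj),
        List.drop_eq_nil_of_le hj]
    simp [cntAlt]
  | succ d ih =>
    intro j c acc hd
    have hj : j < values.length := by omega
    rw [PySem.List.pyRange_one_cons (by exact_mod_cast hj)]
    simp only [List.foldl_cons]
    have hcast : ((j : Int) + 1) = ((j + 1 : Nat) : Int) := by push_cast; ring
    rw [hcast, lvl4 values (values.length - (j + 1)) (j + 1)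
          (c + PySem.List.pyGetD values (j : Int) 0) acc rfl,
        ih (j + 1) c _ (by omega), List.drop_eq_getElem_cons hj]
    simp only [PySem.List.pyGetD_natCast, List.getD_eq_getElem values 0 hj, cntAlt, Nat.reduceAdd]
    have harg : (15 : Int) - (c + values[j]) = 15 - c - values[j] := by ring
    rw [harg]
    omega

theorem lvl2 (values : List Int) : ∀ (d j : Nat) (c acc : Int), values.length - j = d →
    (PySem.List.pyRange (j : Int) values.length 1).foldl (fun points k₀ =>
      (PySem.List.pyRange (k₀ + 1) values.length 1).foldl (fun points k =>
        (PySem.List.pyRange (k + 1) values.length 1).foldl (fun points l =>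
          if c + PySem.List.pyGetD values k₀ 0 + PySem.List.pyGetD values k 0 +
             PySem.List.pyGetD values l 0 = 15
          then points + 2 else points) points) points) acc
    = acc + 2 * cntAlt (values.drop j) 3 (15 - c) := by
  intro d
  induction d with
  | zero =>
    intro j c acc hd
    have hj : values.length ≤ j := by omega
    rw [PySem.List.pyRange_one_eq_nil (by exact_mod_cast hj),
        List.drop_eq_nil_of_le hj]
    simp [cntAlt]
  | succ d ih =>
    intro j c acc hd
    have hj : j < values.length := by omega
    rw [PySem.List.pyRange_one_cons (by exact_mod_cast hj)]
    simp only [List.foldl_cons]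
    have hcast : ((j : Int) + 1) = ((j + 1 : Nat) : Int) := by push_cast; ring
    rw [hcast, lvl3 values (values.length - (j + 1)) (j + 1)
          (c + PySem.List.pyGetD values (j : Int) 0) acc rfl,
        ih (j + 1) c _ (by omega), List.drop_eq_getElem_cons hj]
    simp only [PySem.List.pyGetD_natCast, List.getD_eq_getElem values 0 hj, cntAlt, Nat.reduceAdd]
    have harg : (15 : Int) - (c + values[j]) = 15 - c - values[j] := by ring
    rw [harg]
    omega

theorem lvl1 (values : List Int) : ∀ (d j : Nat) (acc : Int), values.length - j = d →
    (PySem.List.pyRange (j : Int) values.length 1).foldl (fun points i =>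
      (PySem.List.pyRange (i + 1) values.length 1).foldl (fun points k₀ =>
        (PySem.List.pyRange (k₀ + 1) values.length 1).foldl (fun points k =>
          (PySem.List.pyRange (k + 1) values.length 1).foldl (fun points l =>
            if PySem.List.pyGetD values i 0 + PySem.List.pyGetD values k₀ 0 +
               PySem.List.pyGetD values k 0 + PySem.List.pyGetD values l 0 = 15
            then points + 2 else points) points) points) points) acc
    = acc + 2 * cntAlt (values.drop j) 4 15 := by
  intro d
  induction d with
  | zero =>
    intro j acc hd
    have hj : values.length ≤ j := by omega
    rw [PySem.List.pyRange_one_eq_nil (by exact_mod_cast hj),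
        List.drop_eq_nil_of_le hj]
    simp [cntAlt]
  | succ d ih =>
    intro j acc hd
    have hj : j < values.length := by omega
    rw [PySem.List.pyRange_one_cons (by exact_mod_cast hj)]
    simp only [List.foldl_cons]
    have hcast : ((j : Int) + 1) = ((j + 1 : Nat) : Int) := by push_cast; ring
    rw [hcast, lvl2 values (values.length - (j + 1)) (j + 1)
          (PySem.List.pyGetD values (j : Int) 0) acc rfl,
        ih (j + 1) _ (by omega), List.drop_eq_getElem_cons hj]
    simp only [PySem.List.pyGetD_natCast, List.getD_eq_getElem values 0 hj, cntAlt, Nat.reduceAdd]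
    omega

-- ===== VERDICT (by name: the statement is the Claim_ definition above) =====
theorem find15sFourCard_spec : Claim_equal_find15sFourCard := by
  intro values _
  unfold Spec_find15sFourCard find15sFourCard find15sFourCard_alt
  have h := lvl1 values values.length 0 0 (by omega)
  simpa using h
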